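-- pv_equiv track=rewrite | github.com/cseriildi/advent_of_code | 2023/Day14/Solution.py | west
-- ===== SOURCE A (Python) =====
-- def west(pattern):
--     tilted = list()
--     for line in pattern:
--         new_line = line
--         while ".O" in new_line:
--             new_line = new_line.replace(".O", "O.")
--         tilted.append(new_line)
--     return tilted
-- ===== SOURCE B (Python) =====
-- def west(pattern):
--     tilted = []
--     for line in pattern:
--         parts = []
--         dots = 0
--         for c in line:
--             if c == 'O':
--                 parts.append('O')
--             elif c == '.':
--                 dots += 1
--             else:
--                 parts.append('.' * dots)
--                 dots = 0
--                 parts.append(c)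
--         parts.append('.' * dots)
--         tilted.append(''.join(parts))
--     return tilted
-- ===== Notes on version B (the rewrite author's own statement) =====
-- stated objective: alternative
-- what changed: A repeatedly rescans each line with replace('.O','O.') until it reaches a fixpoint (quadratic in the worst case); B makes a single left-to-right pass per line, counting pending '.'s and emitting each 'O' before them, flushing the dots at any other character.
import Mathlib
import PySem

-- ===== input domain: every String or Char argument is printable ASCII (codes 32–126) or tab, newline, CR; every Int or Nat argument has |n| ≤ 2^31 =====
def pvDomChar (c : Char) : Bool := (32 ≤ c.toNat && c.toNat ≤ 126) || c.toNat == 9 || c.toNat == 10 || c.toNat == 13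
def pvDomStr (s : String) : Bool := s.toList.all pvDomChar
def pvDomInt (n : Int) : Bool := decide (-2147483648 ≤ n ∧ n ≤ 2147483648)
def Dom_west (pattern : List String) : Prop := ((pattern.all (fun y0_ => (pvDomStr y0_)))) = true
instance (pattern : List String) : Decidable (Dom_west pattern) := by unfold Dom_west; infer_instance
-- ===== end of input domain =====

-- B replaces A's repeated replace(".O","O.")-until-fixpoint per line by a single
-- left-to-right pass that emits each 'O' before the pending run of '.'s (objective: alternative).

-- ===== PORT A =====
-- characterization of one simultaneous pass of new_line.replace(".O", "O."); used for termination
def rep1 : List Char → List Char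
  | '.' :: 'O' :: t => 'O' :: '.' :: rep1 t
  | c :: t => c :: rep1 t
  | [] => []

-- termination measure: number of ('.', 'O') inversions, via the count d of '.'s already seen
def invAux : Nat → List Char → Nat
  | _, [] => 0
  | d, c :: t => if c = 'O' then d + invAux d t else if c = '.' then invAux (d + 1) t else invAux d t

theorem rep1_not_pat {c : Char} {t : List Char} (h : ¬ ['.', 'O'] <+: (c :: t)) :
    rep1 (c :: t) = c :: rep1 t := by
  rw [rep1.eq_def]
  split
  · rename_i t' heq
    exfalso; apply h; rw [heq]; exact ⟨t', rfl⟩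
  · rename_i c' t' _ heq
    injection heq with h1 h2; subst h1; subst h2; rfl
  · rename_i heq; simp at heq


theorem not_pat_of_hne {c : Char} {t : List Char}
    (hne : ∀ t', c = '.' → t = 'O' :: t' → False) : ¬ ['.', 'O'] <+: (c :: t) := by
  intro hp
  obtain ⟨r, hr⟩ := hp
  simp at hr
  exact hne r hr.1.symm hr.2.symm

theorem go_eq_rep1 : ∀ (fuel : Nat) (l acc : List Char), l.length ≤ fuel →
    PySem.Chars.replace.go ['.', 'O'] ['O', '.'] fuel l acc = acc.reverse ++ rep1 l := by
  intro fuel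
  induction fuel with
  | zero => intro l acc h; simp at h; subst h; simp [PySem.Chars.replace.go, rep1]
  | succ n ih =>
    intro l acc h
    match l with
    | [] => simp [PySem.Chars.replace.go, rep1]
    | c :: t =>
      rw [PySem.Chars.replace.go]
      by_cases hp : ['.', 'O'].isPrefixOf (c :: t) = true
      · obtain ⟨r, hr⟩ := List.isPrefixOf_iff_prefix.mp hp
        rw [← hr]
        simp only [if_pos (hr ▸ hp)]
        rw [ih]
        · simp [rep1]
        · have hlen := congrArg List.length hr
          simp at hlen h ⊢
          omega
      · simp only [if_neg hp]
        rw [ih t (c :: acc) (by simp at h ⊢; omega)]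
        rw [rep1_not_pat (fun hpre => hp (List.isPrefixOf_iff_prefix.mpr hpre))]
        simp

theorem replace_eq_rep1 (l : List Char) :
    PySem.Chars.replace l ['.', 'O'] ['O', '.'] = rep1 l := by
  rw [PySem.Chars.replace, if_neg (by simp)]
  exact go_eq_rep1 l.length l [] le_rfl

theorem invAux_rep1_le : ∀ (l : List Char) (d : Nat), invAux d (rep1 l) ≤ invAux d l := by
  intro l
  induction l using rep1.induct with
  | case1 t ih =>
    intro d
    simp only [rep1, invAux]
    simp only [Char.reduceEq, reduceIte, ite_false]
    have := ih (d + 1)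
    omega
  | case2 c t hne ih =>
    intro d
    have hnp : ¬ ['.', 'O'] <+: (c :: t) := not_pat_of_hne hne
    rw [rep1_not_pat hnp]
    simp only [invAux]
    split_ifs <;> first
      | (have := ih d; omega)
      | (have := ih (d + 1); omega)
  | case3 => intro d; simp [rep1]

theorem invAux_rep1_lt : ∀ (l : List Char) (d : Nat),
    ['.', 'O'] <:+: l → invAux d (rep1 l) < invAux d l := by
  intro l
  induction l using rep1.induct with
  | case1 t _ =>
    intro d _
    simp only [rep1, invAux]
    simp only [Char.reduceEq, reduceIte, ite_false]
    have := invAux_rep1_le t (d + 1)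
    omega
  | case2 c t hne ih =>
    intro d hin
    have hnp : ¬ ['.', 'O'] <+: (c :: t) := not_pat_of_hne hne
    have hin' : ['.', 'O'] <:+: t := by
      rcases List.infix_cons_iff.mp hin with h | h
      · exact absurd h hnp
      · exact h
    rw [rep1_not_pat hnp]
    simp only [invAux]
    split_ifs <;> first
      | (have := ih d hin'; omega)
      | (have := ih (d + 1) hin'; omega)
  | case3 => intro d h; simp at h

theorem tiltWest_dec {s : String} (h : PySem.Str.isIn ".O" s = true) :
    invAux 0 (PySem.Str.replace s ".O" "O.").toList < invAux 0 s.toList := by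
  rw [PySem.Str.toList_replace]
  have hin : ['.', 'O'] <:+: s.toList := by
    simpa using (PySem.Str.isIn_iff_infix _ _).mp h
  rw [show (".O".toList : List Char) = ['.', 'O'] from rfl,
      show ("O.".toList : List Char) = ['O', '.'] from rfl, replace_eq_rep1]
  exact invAux_rep1_lt _ 0 hin

-- while ".O" in new_line: new_line = new_line.replace(".O", "O.")
def tiltWest (s : String) : String :=
  if h : PySem.Str.isIn ".O" s = true then tiltWest (PySem.Str.replace s ".O" "O.") else s
termination_by invAux 0 s.toList
decreasing_by exact tiltWest_dec h

def west (pattern : List String) : List String :=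
  pattern.foldl (fun tilted line => tilted ++ [tiltWest line]) []

-- ===== PORT B =====
-- one pass: dots counts the pending '.'s; an 'O' is emitted before them, any other
-- character flushes them first
def tiltGo : Nat → List Char → List Char
  | dots, [] => List.replicate dots '.'
  | dots, c :: t =>
    if c = 'O' then 'O' :: tiltGo dots t
    else if c = '.' then tiltGo (dots + 1) t
    else List.replicate dots '.' ++ c :: tiltGo 0 t

def west_alt (pattern : List String) : List String :=
  pattern.map (fun line => String.ofList (tiltGo 0 line.toList))

-- ===== PRECONDITION & SPEC =====
def Spec_west (pattern : List String) (out : List String) : Prop := out = west_alt pattern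
instance (pattern : List String) (out : List String) : Decidable (Spec_west pattern out) := by unfold Spec_west; infer_instance

-- ===== CLAIM (what is proved, stated in full; the proofs are below) =====
def Claim_equal_west : Prop := ∀ (pattern : List String), Dom_west pattern → Spec_west pattern (west pattern)

-- ===== LEMMAS AND PROOFS =====

-- one replace pass does not change B's result
theorem tiltGo_rep1 : ∀ (l : List Char) (d : Nat), tiltGo d (rep1 l) = tiltGo d l := by
  intro l
  induction l using rep1.induct with
  | case1 t ih =>
    intro d
    simp only [rep1, tiltGo]
    simp only [Char.reduceEq, reduceIte, ite_false]
    exact congrArg _ (ih (d + 1))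
  | case2 c t hne ih =>
    intro d
    have hnp : ¬ ['.', 'O'] <+: (c :: t) := not_pat_of_hne hne
    rw [rep1_not_pat hnp]
    simp only [tiltGo]
    split_ifs <;> simp [ih]
  | case3 => intro d; simp [rep1]

-- a line with no ".O" is a fixpoint of B's pass
theorem tiltGo_fix : ∀ (l : List Char) (d : Nat),
    ¬ ['.', 'O'] <:+: (List.replicate d '.' ++ l) → tiltGo d l = List.replicate d '.' ++ l := by
  intro l
  induction l with
  | nil => intro d _; simp [tiltGo]
  | cons c t ih =>
    intro d h
    simp only [tiltGo]
    by_cases hO : c = 'O'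
    · subst hO
      have hd : d = 0 := by
        by_contra hd
        apply h
        obtain ⟨k, hk⟩ : ∃ k, d = k + 1 := ⟨d - 1, by omega⟩
        subst hk
        exact ⟨List.replicate k '.', t, by simp [List.replicate_succ']⟩
      subst hd
      rw [if_pos rfl, ih 0]
      · simp
      · intro hc
        apply h
        obtain ⟨s1, s2, e⟩ := hc
        exact ⟨'O' :: s1, s2, by simp at e ⊢; exact e⟩
    · rw [if_neg hO]
      by_cases hD : c = '.'
      · subst hD
        rw [if_pos rfl, ih (d + 1)]
        · simp [List.replicate_succ']
        · intro hc; apply h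
          simpa [List.replicate_succ'] using hc
      · rw [if_neg hD, ih 0]
        · simp
        · intro hc; apply h
          obtain ⟨s1, s2, e⟩ := hc
          simp only [List.replicate_zero, List.nil_append] at e
          exact ⟨List.replicate d '.' ++ c :: s1, s2, by simp [← e]⟩

theorem tiltWest_eq (s : String) : tiltWest s = String.ofList (tiltGo 0 s.toList) := by
  induction s using tiltWest.induct with
  | case1 s h ih =>
    rw [tiltWest, dif_pos h, ih]
    congr 1
    rw [PySem.Str.toList_replace,
      show (".O".toList : List Char) = ['.', 'O'] from rfl,
      show ("O.".toList : List Char) = ['O', '.'] from rfl,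
      replace_eq_rep1, tiltGo_rep1]
  | case2 s h =>
    rw [tiltWest, dif_neg h]
    have hni : ¬ ['.', 'O'] <:+: s.toList := by
      intro hc
      exact h ((PySem.Str.isIn_iff_infix _ _).mpr (by simpa using hc))
    rw [tiltGo_fix s.toList 0 (by simpa using hni)]
    simp [String.ofList]

-- ===== VERDICT (by name: the statement is the Claim_ definition above) =====
theorem west_spec : Claim_equal_west := by
  intro pattern _
  unfold Spec_west west west_alt
  rw [PySem.List.foldl_append_singleton_eq_map]
  simp [tiltWest_eq]
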